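-- pv_equiv track=rewrite | github.com/ep3p/UVa_problems | Python Complete Tree Labeling.py | rec
-- ===== SOURCE A (Python) =====
-- def cbin(n,k):
-- 	if k > n//2:
-- 		k = n - k
--
-- 	top = 1
-- 	bot = 1
-- 	for i in range(2,k+1):
-- 		bot *= i
-- 	for i in range(n-k+1,n+1):
-- 		top *= i
-- 	return top//bot
--
-- def rec(t,b):
-- 	res = 1
-- 	if b > 1:
-- 		dif = t // b
-- 		if dif == 1:
-- 			for i in range(2,b+1):
-- 				res *= i
-- 		else:
-- 			for i in range(b-1):
-- 				res *= cbin(t,dif)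
-- 				t -= dif
-- 			res *= pow(rec(dif-1,b),b)
-- 	return res
-- ===== SOURCE B (Python) =====
-- def fact(n):
--     r = 1
--     for i in range(2, n + 1):
--         r *= i
--     return r
--
-- def rec(t, b):
--     # Depth loop over levels: each level's factor of b-1 binomials collapses
--     # to one factorial ratio s!/((dif!)**(b-1) * (s-(b-1)*dif)!), raised to
--     # the number of identical subtrees at that depth (power = b**depth).
--     res = 1
--     power = 1
--     s = t
--     while b > 1:
--         dif = s // b
--         if dif == 1:
--             res *= fact(b) ** power
--             break
--         res *= (fact(s) // (fact(dif) ** (b - 1) * fact(s - (b - 1) * dif))) ** power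
--         s = dif - 1
--         power *= b
--     return res
-- ===== Notes on version B (the rewrite author's own statement) =====
-- stated objective: alternative
-- what changed: Replaces A's recursion rec(dif-1,b)**b and its inner loop of b-1 running binomial coefficients cbin(t,dif) by an iterative depth loop whose level factor is a single factorial ratio s!/((dif!)**(b-1)*(s-(b-1)*dif)!), raised to the accumulated subtree count power = b**depth.
import Mathlib
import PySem

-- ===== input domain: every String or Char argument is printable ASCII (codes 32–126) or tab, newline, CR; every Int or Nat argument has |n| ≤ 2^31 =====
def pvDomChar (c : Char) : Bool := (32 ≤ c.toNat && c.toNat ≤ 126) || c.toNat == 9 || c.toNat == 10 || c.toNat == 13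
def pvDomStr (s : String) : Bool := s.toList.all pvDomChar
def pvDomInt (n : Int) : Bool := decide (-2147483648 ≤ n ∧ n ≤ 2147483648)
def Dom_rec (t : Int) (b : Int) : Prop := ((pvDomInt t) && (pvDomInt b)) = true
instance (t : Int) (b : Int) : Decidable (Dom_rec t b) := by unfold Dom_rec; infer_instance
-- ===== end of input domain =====

-- B replaces A's recursion and its per-level loop of b-1 binomial coefficients by a depth loop
-- whose level factor is a single factorial ratio s!/((dif!)^(b-1)·(s-(b-1)·dif)!), raised to the
-- accumulated subtree count power = b^depth; objective: alternative (same cost).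

-- ===== PORT A =====
-- helper cbin of Source A
def cbin (n : Int) (k : Int) : Int :=
  let k := if k > PySem.Int.floordiv n 2 then n - k else k
  let bot := (PySem.List.pyRange 2 (k + 1) 1).foldl (fun acc i => acc * i) 1
  let top := (PySem.List.pyRange (n - k + 1) (n + 1) 1).foldl (fun acc i => acc * i) 1
  PySem.Int.floordiv top bot

-- Python's recursion is not structurally decreasing (it diverges and raises RecursionError outside
-- Pre_rec), so the port takes a fuel parameter; fuel 64 exceeds the recursion depth on every Dom
-- input on which the Python returns (depth ≤ 31 since |t| ≤ 2^31 and b ≥ 2; proved below).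
def recAux : Nat → Int → Int → Int
  | 0, _, _ => 0
  | fuel + 1, t, b =>
    if b > 1 then
      let dif := PySem.Int.floordiv t b
      if dif = 1 then
        (PySem.List.pyRange 2 (b + 1) 1).foldl (fun res i => res * i) 1
      else
        let st := (PySem.List.pyRange 0 (b - 1) 1).foldl
          (fun (p : Int × Int) _ => (p.1 * cbin p.2 dif, p.2 - dif)) (1, t)
        st.1 * (recAux fuel (dif - 1) b) ^ b.toNat
    else 1

def rec (t : Int) (b : Int) : Int := recAux 64 t b

-- ===== PORT B =====
-- helper fact of Source B
def fact (n : Int) : Int :=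
  (PySem.List.pyRange 2 (n + 1) 1).foldl (fun r i => r * i) 1

-- the while-loop of Source B, with the same fuel convention as the A-side port
def recAltAux : Nat → Int → Int → Int → Int → Int
  | 0, _, res, _, _ => res
  | fuel + 1, b, res, power, s =>
    if b > 1 then
      let dif := PySem.Int.floordiv s b
      if dif = 1 then
        res * (fact b) ^ power.toNat
      else
        let blk := PySem.Int.floordiv (fact s)
          ((fact dif) ^ (b - 1).toNat * fact (s - (b - 1) * dif))
        recAltAux fuel b (res * blk ^ power.toNat) (power * b) (dif - 1)
    else res

def rec_alt (t : Int) (b : Int) : Int := recAltAux 64 b 1 1 t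

-- ===== PRECONDITION & SPEC =====
-- Lower/upper ends of the k-th interval of t-values on which A's recursion bottoms out:
-- preL b k = b + b^2 + … + b^(k+1), preR b k = preL b k + b^(k+1) - 1.
def preL (b : Int) : Nat → Int
  | 0 => b
  | k + 1 => b * (preL b k + 1)

def preR (b : Int) : Nat → Int
  | 0 => 2 * b - 1
  | k + 1 => b * (preR b k + 2) - 1

-- Pre_ excludes exactly the inputs on which A never returns: for b ≥ 2 with t outside every
-- interval [preL b k, preR b k] the chain t → t//b - 1 never hits dif == 1, the Python recursion
-- diverges and raises RecursionError (and B's loop diverges too).  The bound on k is vacuous: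
-- preL b k ≤ t already forces 2^(k+1) ≤ t (proved in preL_ge below), hence k < log2(t+1);
-- the bound only makes the quantifier decidable.
def Pre_rec (t : Int) (b : Int) : Prop :=
  b ≤ 1 ∨ ∃ k : Nat, k ≤ Nat.log2 (t.toNat + 1) ∧ preL b k ≤ t ∧ t ≤ preR b k
instance (t : Int) (b : Int) : Decidable (Pre_rec t b) := by unfold Pre_rec; infer_instance

def pvWitness_rec : Int × Int := (14, 2)

def Spec_rec (t : Int) (b : Int) (out : Int) : Prop := out = rec_alt t b
instance (t : Int) (b : Int) (out : Int) : Decidable (Spec_rec t b out) := by unfold Spec_rec; infer_instance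

-- ===== CLAIM (what is proved, stated in full; the proofs are below) =====
def Claim_equal_rec : Prop := ∀ (t : Int) (b : Int), Dom_rec t b → Pre_rec t b → Spec_rec t b (rec t b)

-- ===== LEMMAS AND PROOFS =====

theorem foldl_mul_eq (l : List Int) : ∀ c : Int, l.foldl (fun a b => a * b) c = c * l.prod := by
  induction l with
  | nil => intro c; simp
  | cons x xs ih => intro c; simp only [List.foldl_cons, ih, List.prod_cons]; ring

-- the product over range(2, k+1) is k!
theorem botProd (k : Nat) : (PySem.List.pyRange 2 ((k : Int) + 1) 1).prod = (k.factorial : Int) := by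
  induction k with
  | zero => rw [PySem.List.pyRange_one_eq_nil (by norm_num)]; simp [Nat.factorial]
  | succ k ih =>
    have e : (((k + 1 : Nat)) : Int) + 1 = ((k : Int) + 1) + 1 := by push_cast; ring
    rw [e]
    by_cases hk : k = 0
    · subst hk
      rw [PySem.List.pyRange_one_eq_nil (by norm_num)]
      simp [Nat.factorial]
    · rw [PySem.List.pyRange_one_succ_right (by omega : (2:Int) ≤ (k : Int) + 1),
        List.prod_append, ih]
      simp only [List.prod_cons, List.prod_nil, Nat.factorial_succ]
      push_cast
      ring

-- the product over range(n-k+1, n+1) is the falling factorial n·(n-1)⋯(n-k+1)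
theorem topProd (n : Nat) : ∀ k : Nat, k ≤ n →
    (PySem.List.pyRange ((n : Int) - (k : Int) + 1) ((n : Int) + 1) 1).prod = (n.descFactorial k : Int) := by
  intro k
  induction k with
  | zero =>
    intro _
    rw [show (n : Int) - ((0 : Nat) : Int) + 1 = (n : Int) + 1 by push_cast; ring,
      PySem.List.pyRange_one_eq_nil (by omega)]
    simp
  | succ k ih =>
    intro hk
    rw [show (n : Int) - (((k + 1 : Nat)) : Int) + 1 = (n : Int) - (k : Int) by push_cast; ring,
      PySem.List.pyRange_one_cons (by omega), List.prod_cons, ih (by omega)]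
    have hnk : ((n - k : Nat) : Int) = (n : Int) - (k : Int) := by omega
    rw [Nat.descFactorial_succ, Nat.cast_mul, hnk]

theorem cbin_core (n k : Nat) (hk : k ≤ n) :
    PySem.Int.floordiv
      ((PySem.List.pyRange ((n : Int) - (k : Int) + 1) ((n : Int) + 1) 1).foldl (fun acc i => acc * i) 1)
      ((PySem.List.pyRange 2 ((k : Int) + 1) 1).foldl (fun acc i => acc * i) 1)
    = (n.choose k : Int) := by
  rw [foldl_mul_eq, foldl_mul_eq, one_mul, one_mul, topProd n k hk, botProd k,
    PySem.Int.floordiv_natCast, Nat.choose_eq_descFactorial_div_factorial]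

theorem cbin_eq_choose (n k : Nat) (hk : k ≤ n) : cbin (n : Int) (k : Int) = (n.choose k : Int) := by
  unfold cbin
  by_cases h : (k : Int) > PySem.Int.floordiv (n : Int) 2
  · simp only [if_pos h]
    rw [show (n : Int) - (k : Int) = ((n - k : Nat) : Int) by omega]
    rw [cbin_core n (n - k) (by omega), Nat.choose_symm hk]
  · simp only [if_neg h]
    exact cbin_core n k hk

-- product of the b-1 binomials A multiplies at one level
def chainP (d : Nat) : Nat → Nat → Nat
  | _, 0 => 1
  | n, m + 1 => n.choose d * chainP d (n - d) m

theorem foldl_chain {α : Type} (d : Nat) :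
    ∀ (m : Nat) (l : List α), l.length = m → ∀ (n : Nat), m * d ≤ n → ∀ (c : Int),
      l.foldl (fun (p : Int × Int) _ => (p.1 * cbin p.2 (d : Int), p.2 - (d : Int))) (c, (n : Int))
      = (c * (chainP d n m : Int), ((n - m * d : Nat) : Int)) := by
  intro m
  induction m with
  | zero =>
    intro l hl n _ c
    rw [List.length_eq_zero_iff.mp hl]
    simp [chainP]
  | succ m ih =>
    intro l hl n hmn c
    obtain ⟨x, l', rfl⟩ : ∃ x l', l = x :: l' := by
      cases l with
      | nil => simp at hl
      | cons x l' => exact ⟨x, l', rfl⟩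
    rw [Nat.succ_mul] at hmn
    have hdn : d ≤ n := by omega
    have hmd : m * d ≤ n - d := by omega
    simp only [List.foldl_cons]
    rw [show (n : Int) - (d : Int) = ((n - d : Nat) : Int) by omega]
    rw [cbin_eq_choose n d hdn]
    rw [ih l' (by simpa using hl) (n - d) hmd (c * (n.choose d : Int))]
    simp only [Prod.mk.injEq]
    constructor
    · simp only [chainP]; push_cast; ring
    · rw [show n - (m + 1) * d = n - d - m * d by rw [Nat.succ_mul]; omega]

theorem chainP_mul (d : Nat) : ∀ (m n : Nat), m * d ≤ n →
    chainP d n m * d.factorial ^ m * (n - m * d).factorial = n.factorial := by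
  intro m
  induction m with
  | zero => intro n _; simp [chainP]
  | succ m ih =>
    intro n hmn
    rw [Nat.succ_mul] at hmn
    have hdn : d ≤ n := by omega
    have h1 : n - (m + 1) * d = (n - d) - m * d := by rw [Nat.succ_mul]; omega
    have h2 : m * d ≤ n - d := by omega
    calc chainP d n (m + 1) * d.factorial ^ (m + 1) * (n - (m + 1) * d).factorial
        = n.choose d * d.factorial * (chainP d (n - d) m * d.factorial ^ m * ((n - d) - m * d).factorial) := by
          simp only [chainP, h1, pow_succ]; ring
      _ = n.choose d * d.factorial * (n - d).factorial := by rw [ih (n - d) h2]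
      _ = n.factorial := Nat.choose_mul_factorial_mul_factorial hdn

theorem fact_natCast (n : Nat) : fact (n : Int) = (n.factorial : Int) := by
  unfold fact
  rw [foldl_mul_eq, one_mul]
  exact botProd n

-- the two level factors agree: A's running product of b-1 binomials = B's factorial ratio
theorem block_eq (b s dif : Int) (hb : 1 < b) (hdif : 2 ≤ dif) (hbd : b * dif ≤ s) :
    ((PySem.List.pyRange 0 (b - 1) 1).foldl
      (fun (p : Int × Int) _ => (p.1 * cbin p.2 dif, p.2 - dif)) (1, s)).1
    = PySem.Int.floordiv (fact s) ((fact dif) ^ (b - 1).toNat * fact (s - (b - 1) * dif)) := by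
  have hs : 0 ≤ s := by nlinarith
  obtain ⟨n, rfl⟩ : ∃ n : Nat, s = (n : Int) := ⟨s.toNat, (Int.toNat_of_nonneg hs).symm⟩
  obtain ⟨d, rfl⟩ : ∃ d : Nat, dif = (d : Int) := ⟨dif.toNat, (Int.toNat_of_nonneg (by omega)).symm⟩
  obtain ⟨m, hmb⟩ : ∃ m : Nat, (m : Int) = b - 1 := ⟨(b - 1).toNat, Int.toNat_of_nonneg (by omega)⟩
  have hlen : (PySem.List.pyRange 0 (b - 1) 1).length = m := by
    rw [PySem.List.length_pyRange_one]; omega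
  have hmd : m * d ≤ n := by
    have h1 : ((m * d : Nat) : Int) ≤ (n : Int) := by push_cast; nlinarith
    exact_mod_cast h1
  rw [foldl_chain d m _ hlen n hmd 1]
  have hsub : (n : Int) - (b - 1) * (d : Int) = ((n - m * d : Nat) : Int) := by
    rw [Nat.cast_sub hmd, Nat.cast_mul, hmb]
  rw [hsub, fact_natCast, fact_natCast, fact_natCast]
  rw [show (b - 1).toNat = m by omega]
  rw [show ((d.factorial : Int)) ^ m = ((d.factorial ^ m : Nat) : Int) by push_cast; rfl]
  rw [show ((d.factorial ^ m : Nat) : Int) * (((n - m * d).factorial : Nat) : Int)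
      = ((d.factorial ^ m * (n - m * d).factorial : Nat) : Int) by push_cast; rfl]
  rw [PySem.Int.floordiv_natCast]
  have hpos : 0 < d.factorial ^ m * (n - m * d).factorial :=
    Nat.mul_pos (pow_pos (Nat.factorial_pos d) m) (Nat.factorial_pos _)
  have hquot : n.factorial / (d.factorial ^ m * (n - m * d).factorial) = chainP d n m := by
    rw [← chainP_mul d m n hmd, mul_assoc]
    exact Nat.mul_div_cancel _ hpos
  simp [hquot]

-- termination of A's recursion within the given fuel
def Term (b : Int) : Nat → Int → Prop
  | 0, _ => False
  | f + 1, s => PySem.Int.floordiv s b = 1 ∨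
      (PySem.Int.floordiv s b ≠ 1 ∧ Term b f (PySem.Int.floordiv s b - 1))

theorem Term_mono (b : Int) : ∀ {f g : Nat}, f ≤ g → ∀ {s : Int}, Term b f s → Term b g s := by
  intro f
  induction f with
  | zero => intro g _ s h; exact absurd h (by simp [Term])
  | succ f ih =>
    intro g hfg s h
    obtain ⟨g', rfl⟩ : ∃ g', g = g' + 1 := ⟨g - 1, by omega⟩
    rcases h with h1 | ⟨hne, ht⟩
    · exact Or.inl h1
    · exact Or.inr ⟨hne, ih (by omega) ht⟩

theorem Term_dif_ge_one {b : Int} (hb : 1 < b) :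
    ∀ {f : Nat} {s : Int}, Term b f s → 1 ≤ PySem.Int.floordiv s b := by
  intro f
  induction f with
  | zero => intro s h; exact absurd h (by simp [Term])
  | succ f ih =>
    intro s h
    rcases h with h1 | ⟨hne, ht⟩
    · omega
    · have h2 := ih ht
      have h3 : 1 * b ≤ PySem.Int.floordiv s b - 1 :=
        (PySem.Int.le_floordiv_iff_mul_le (by omega : (0:Int) < b)).mp h2
      omega

theorem fdiv_bounds {b L R t : Int} (hb : 1 < b)
    (hl : b * (L + 1) ≤ t) (hr : t ≤ b * (R + 2) - 1) :
    L + 1 ≤ PySem.Int.floordiv t b ∧ PySem.Int.floordiv t b ≤ R + 1 := by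
  constructor
  · rw [PySem.Int.le_floordiv_iff_mul_le (by omega : (0:Int) < b)]
    nlinarith
  · have h2 : PySem.Int.floordiv t b < R + 2 := by
      rw [PySem.Int.floordiv_lt_iff_lt_mul (by omega : (0:Int) < b)]
      nlinarith
    omega

theorem pre_term {b : Int} (hb : 1 < b) :
    ∀ (k : Nat) (t : Int), preL b k ≤ t → t ≤ preR b k → Term b (k + 1) t := by
  intro k
  induction k with
  | zero =>
    intro t hl hr
    refine Or.inl ?_
    have := fdiv_bounds hb (L := 0) (R := 0) (by simpa [preL] using hl) (by simp [preR] at hr; omega)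
    omega
  | succ k ih =>
    intro t hl hr
    have hLb : b ≤ preL b k := by
      clear hl hr ih
      induction k with
      | zero => simp [preL]
      | succ k ih => simp only [preL]; nlinarith
    have h := fdiv_bounds hb (L := preL b k) (R := preR b k)
      (by simpa [preL] using hl) (by simp [preR] at hr; omega)
    exact Or.inr ⟨by omega, ih (PySem.Int.floordiv t b - 1) (by omega) (by omega)⟩

theorem preL_ge {b : Int} (hb : 1 < b) : ∀ k : Nat, 2 ^ (k + 1) ≤ preL b k := by
  intro k
  induction k with
  | zero => simpa [preL] using hb
  | succ k ih =>
    have hpos : (0:Int) < 2 ^ (k + 1) := by positivity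
    have h2 : (2:Int) ^ (k + 1 + 1) = 2 * 2 ^ (k + 1) := by ring
    have hp : (0:Int) ≤ preL b k + 1 := by nlinarith
    simp only [preL]
    rw [h2]
    nlinarith [mul_nonneg (show (0:Int) ≤ b - 2 by omega) hp]

theorem toNat_mul_of_nonneg {a c : Int} (ha : 0 ≤ a) (hc : 0 ≤ c) :
    (a * c).toNat = a.toNat * c.toNat := by
  rcases Int.eq_ofNat_of_zero_le ha with ⟨m, rfl⟩
  rcases Int.eq_ofNat_of_zero_le hc with ⟨n, rfl⟩
  rw [← Int.natCast_mul, Int.toNat_natCast, Int.toNat_natCast, Int.toNat_natCast]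

theorem main_lemma {b : Int} (hb : 1 < b) :
    ∀ (fuel : Nat) (s res power : Int), 0 ≤ power → Term b fuel s →
      recAltAux fuel b res power s = res * (recAux fuel s b) ^ power.toNat := by
  intro fuel
  induction fuel with
  | zero => intro s res power _ h; exact absurd h (by simp [Term])
  | succ fuel ih =>
    intro s res power hpow hterm
    simp only [recAltAux, recAux, if_pos hb]
    rcases hterm with h1 | ⟨hne, ht⟩
    · rw [if_pos h1, if_pos h1]; rfl
    · rw [if_neg hne, if_neg hne]
      have hterm' : Term b (fuel + 1) s := by
        simp only [Term]; exact Or.inr ⟨hne, ht⟩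
      have hd1 : 1 ≤ PySem.Int.floordiv s b := Term_dif_ge_one hb hterm'
      have hd2 : 2 ≤ PySem.Int.floordiv s b := by omega
      have hbd : b * PySem.Int.floordiv s b ≤ s := by
        have h := (PySem.Int.le_floordiv_iff_mul_le (by omega : (0:Int) < b)).mp
          (le_refl (PySem.Int.floordiv s b))
        nlinarith [h]
      rw [← block_eq b s (PySem.Int.floordiv s b) hb hd2 hbd]
      rw [ih _ _ _ (by positivity) ht]
      rw [mul_pow, ← pow_mul, mul_assoc,
        toNat_mul_of_nonneg hpow (by omega : (0:Int) ≤ b), Nat.mul_comm]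

theorem rec_eq_of_term {t b : Int} (hb : 1 < b) (h : Term b 64 t) : rec t b = rec_alt t b := by
  have := main_lemma hb 64 t 1 1 (by omega) h
  simpa [rec, rec_alt] using this.symm

-- ===== VERDICT (by name: the statement is the Claim_ definition above) =====
theorem rec_spec : Claim_equal_rec := by
  intro t b hdom hpre
  unfold Spec_rec
  rcases hpre with hb | ⟨k, _, hl, hr⟩
  · simp [rec, rec_alt, recAux, recAltAux, show ¬ b > 1 by omega]
  · by_cases hb : 1 < b
    · have htb : t ≤ 2147483648 := by
        unfold Dom_rec pvDomInt at hdom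
        simp only [Bool.and_eq_true, decide_eq_true_eq] at hdom
        omega
      have hk : k ≤ 62 := by
        by_contra hk
        have h1 : (2:Int) ^ 32 ≤ 2 ^ (k + 1) := by
          apply pow_le_pow_right₀ (by omega)
          omega
        have h2 := preL_ge hb k
        norm_num at h1
        omega
      exact rec_eq_of_term hb (Term_mono b (by omega) (pre_term hb k t hl hr))
    · simp [rec, rec_alt, recAux, recAltAux, hb]
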